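-- pv_equiv track=rewrite | github.com/cihat/python-game-challenge | index.py | iterate_prv_nxt
-- ===== SOURCE A (Python) =====
-- def iterate_prv_nxt(my_list):
--     prv, cur, nxt = None, iter(my_list), iter(my_list)
--     next(nxt, None)
--
--     while True:
--         try:
--             if prv:
--                 yield next(prv), next(cur), next(nxt, None)
--             else:
--                 yield None, next(cur), next(nxt, None)
--                 prv = iter(my_list)
--         except StopIteration:
--             break
-- ===== SOURCE B (Python) =====
-- def iterate_prv_nxt(my_list):
--     n = len(my_list)
--     for i in range(n):
--         prev = my_list[i - 1] if i > 0 else None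
--         nxt = my_list[i + 1] if i + 1 < n else None
--         yield prev, my_list[i], nxt
-- ===== Notes on version B (the rewrite author's own statement) =====
-- stated objective: simpler
-- what changed: Replaces the three coordinated iterators with a sentinel and StopIteration control flow by a single index loop that reads prev/cur/next by random access with boundary checks.
import Mathlib
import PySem

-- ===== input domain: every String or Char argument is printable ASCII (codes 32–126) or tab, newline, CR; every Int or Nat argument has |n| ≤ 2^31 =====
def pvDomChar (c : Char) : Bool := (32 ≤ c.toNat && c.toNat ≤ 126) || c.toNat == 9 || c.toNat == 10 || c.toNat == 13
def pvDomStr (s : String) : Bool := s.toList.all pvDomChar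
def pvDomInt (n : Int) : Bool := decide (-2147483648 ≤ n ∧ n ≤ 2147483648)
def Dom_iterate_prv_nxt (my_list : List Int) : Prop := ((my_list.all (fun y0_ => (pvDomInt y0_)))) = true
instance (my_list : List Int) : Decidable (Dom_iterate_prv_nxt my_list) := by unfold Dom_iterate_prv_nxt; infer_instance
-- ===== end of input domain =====

-- B replaces A's three coordinated iterators (with a sentinel and StopIteration control flow)
-- by a single index loop using random access with boundary checks; objective: simpler.

-- ===== PORT A =====
-- Iterators are modelled as their remaining suffix; `prv? = none` models `prv = None`.
-- `next(it)` on an empty suffix is StopIteration (caught: the loop breaks, returning the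
-- triples yielded so far); `next(nxt, None)` is `nxt.head?` / advancing by `drop 1`.
def iterate_prv_nxt_loop (prv? : Option (List Int)) (cur nxt orig : List Int) :
    List (Option Int × Int × Option Int) :=
  match prv? with
  | none =>
    match cur with
    | [] => []                     -- next(cur) raised StopIteration → break
    | c :: cs =>
        (none, c, nxt.head?) :: iterate_prv_nxt_loop (some orig) cs (nxt.drop 1) orig
  | some [] => []                  -- next(prv) raised StopIteration → break
  | some (p :: ps) =>
    match cur with
    | [] => []                     -- next(cur) raised StopIteration → break
    | c :: cs =>
        (some p, c, nxt.head?) :: iterate_prv_nxt_loop (some ps) cs (nxt.drop 1) orig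
termination_by cur.length

def iterate_prv_nxt (my_list : List Int) : List (Option Int × Int × Option Int) :=
  iterate_prv_nxt_loop none my_list (my_list.drop 1) my_list

-- ===== PORT B =====
def iterate_prv_nxt_alt (my_list : List Int) : List (Option Int × Int × Option Int) :=
  (PySem.List.pyRange 0 my_list.length 1).map (fun i =>
    ((if 0 < i then PySem.List.pyGet? my_list (i - 1) else none),
     (PySem.List.pyGet? my_list i).getD 0,   -- i < len: always `some`; `.getD 0` only totalises
     (if i + 1 < (my_list.length : Int) then PySem.List.pyGet? my_list (i + 1) else none)))

-- ===== PRECONDITION & SPEC =====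
def Spec_iterate_prv_nxt (my_list : List Int) (out : List (Option Int × Int × Option Int)) : Prop := out = iterate_prv_nxt_alt my_list
instance (my_list : List Int) (out : List (Option Int × Int × Option Int)) : Decidable (Spec_iterate_prv_nxt my_list out) := by unfold Spec_iterate_prv_nxt; infer_instance

-- ===== CLAIM (what is proved, stated in full; the proofs are below) =====
def Claim_equal_iterate_prv_nxt : Prop := ∀ (my_list : List Int), Dom_iterate_prv_nxt my_list → Spec_iterate_prv_nxt my_list (iterate_prv_nxt my_list)

-- ===== LEMMAS AND PROOFS =====

-- Common reference form: the list of (prev, cur, next) triples, carrying the previous element.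
def pvTriples (p : Option Int) : List Int → List (Option Int × Int × Option Int)
  | [] => []
  | c :: cs => (p, c, cs.head?) :: pvTriples (some c) cs

theorem loop_eq_triples (cur : List Int) : ∀ (c : Int) (orig : List Int),
    iterate_prv_nxt_loop (some (c :: cur)) cur cur.tail orig = pvTriples (some c) cur := by
  induction cur with
  | nil => intro c orig; simp [iterate_prv_nxt_loop, pvTriples]
  | cons d ds ih =>
      intro c orig
      simp [iterate_prv_nxt_loop, pvTriples, ih d orig]

theorem a_eq_triples (l : List Int) : iterate_prv_nxt l = pvTriples none l := by
  cases l with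
  | nil => simp [iterate_prv_nxt, iterate_prv_nxt_loop, pvTriples]
  | cons c cs =>
      simp [iterate_prv_nxt, iterate_prv_nxt_loop, pvTriples]
      simpa using loop_eq_triples cs c (c :: cs)

theorem triples_length (l : List Int) : ∀ p, (pvTriples p l).length = l.length := by
  induction l with
  | nil => intro p; rfl
  | cons c cs ih => intro p; simp [pvTriples, ih]

theorem triples_getElem? (l : List Int) : ∀ (p : Option Int) (i : Nat), i < l.length →
    (pvTriples p l)[i]? = some ((if i = 0 then p else l[i - 1]?), l.getD i 0, l[i + 1]?) := by
  induction l with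
  | nil => intro p i h; simp at h
  | cons c cs ih =>
      intro p i h
      cases i with
      | zero => simp [pvTriples, List.head?_eq_getElem?]
      | succ j =>
          have hj : j < cs.length := by simpa using h
          simp only [pvTriples, List.getElem?_cons_succ, ih (some c) j hj]
          cases j with
          | zero => simp
          | succ k => simp [List.getD]

theorem b_eq_triples (l : List Int) : iterate_prv_nxt_alt l = pvTriples none l := by
  apply List.ext_getElem?
  intro i
  by_cases h : i < l.length
  · rw [triples_getElem? l none i h]
    unfold iterate_prv_nxt_alt
    rw [PySem.List.getElem?_map_pyRange_zero _ _ _ h]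
    congr 1
    refine Prod.ext ?_ (Prod.ext ?_ ?_)
    · by_cases h0 : i = 0
      · simp [h0]
      · have hpos : (0 : Int) < (i : Int) := by omega
        have hcast : ((i : Int) - 1) = ((i - 1 : Nat) : Int) := by omega
        simp [hcast, PySem.List.pyGet?_natCast, h0]
    · rw [PySem.List.pyGet?_natCast, List.getD_eq_getElem?_getD]
    · by_cases hn : i + 1 < l.length
      · have hlt : (i : Int) + 1 < (l.length : Int) := by omega
        have hcast : ((i : Int) + 1) = ((i + 1 : Nat) : Int) := by omega
        rw [if_pos hlt]
        simp [show PySem.List.pyGet? l ((i : Int) + 1) = l[i + 1]? by rw [hcast, PySem.List.pyGet?_natCast]]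
      · have hge : ¬ ((i : Int) + 1 < (l.length : Int)) := by omega
        simp [hge, List.getElem?_eq_none (by omega : l.length ≤ i + 1)]
  · have h1 : (iterate_prv_nxt_alt l).length ≤ i := by
      simp [iterate_prv_nxt_alt, PySem.List.length_pyRange_one]
      omega
    have h2 : (pvTriples none l).length ≤ i := by rw [triples_length]; omega
    rw [List.getElem?_eq_none h1, List.getElem?_eq_none h2]

-- ===== VERDICT (by name: the statement is the Claim_ definition above) =====
theorem iterate_prv_nxt_spec : Claim_equal_iterate_prv_nxt := by
  intro l _
  unfold Spec_iterate_prv_nxt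
  rw [a_eq_triples, b_eq_triples]
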